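-- pv_equiv track=rewrite | github.com/rmanky/homework2 | question2.py | check_reverse
-- ===== SOURCE A (Python) =====
-- def check_reverse(string1, string2):
--     if string1[0:1] == string2[len(string2) - 1:len(string2)]:
--         if len(string1) > 1:
--             return check_reverse(string1[1:len(string1)], string2[0:len(string2)-1])
--         else:
--             return True
--     else:
--         return False
-- ===== SOURCE B (Python) =====
-- def check_reverse(string1, string2):
--     if not string1:
--         return not string2
--     if len(string2) < len(string1):
--         return False
--     return string2[len(string2) - len(string1):][::-1] == string1
-- ===== Notes on version B (the rewrite author's own statement) =====
-- stated objective: faster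
-- what changed: Replaced A's recursion that rebuilds both strings by slicing at every step (O(n^2) copying) with a single length check plus one suffix slice/reverse comparison (O(n), no recursion).
import Mathlib
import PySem

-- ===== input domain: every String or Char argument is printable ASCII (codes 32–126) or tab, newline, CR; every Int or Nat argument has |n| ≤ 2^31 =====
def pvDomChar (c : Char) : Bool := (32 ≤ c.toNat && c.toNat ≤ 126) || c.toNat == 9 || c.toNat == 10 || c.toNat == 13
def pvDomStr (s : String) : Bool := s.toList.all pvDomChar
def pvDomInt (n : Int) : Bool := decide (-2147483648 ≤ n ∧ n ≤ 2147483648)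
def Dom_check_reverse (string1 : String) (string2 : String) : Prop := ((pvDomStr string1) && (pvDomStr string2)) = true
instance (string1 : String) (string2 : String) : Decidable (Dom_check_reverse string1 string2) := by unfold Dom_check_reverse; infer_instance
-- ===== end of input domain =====

-- B replaces A's slice-and-recurse (fresh copies of both strings at every step) with one
-- length check plus a single suffix slice, reversed and compared.

-- wrapper with explicit bounds for PySem.List.slice_toNat, cited by the port's decreasing_by and the proofs
lemma sliceNN (xs : List Char) (a b : Int) (ha : 0 ≤ a) (hb : 0 ≤ b) :
    PySem.List.slice xs (some a) (some b) = List.take (b.toNat - a.toNat) (List.drop a.toNat xs) :=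
  PySem.List.slice_toNat xs ha hb

-- ===== PORT A =====
-- literal transliteration of A's recursion, over the code-point lists
def checkRevGo (l1 l2 : List Char) : Bool :=
  if PySem.List.slice l1 (some 0) (some 1) = PySem.List.slice l2 (some ((l2.length : Int) - 1)) (some (l2.length : Int)) then
    if l1.length > 1 then
      checkRevGo (PySem.List.slice l1 (some 1) (some (l1.length : Int)))
                 (PySem.List.slice l2 (some 0) (some ((l2.length : Int) - 1)))
    else true
  else false
termination_by l1.length
decreasing_by
  rw [sliceNN l1 1 (l1.length : Int) (by omega) (by omega)]
  simp only [List.length_take, List.length_drop]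
  omega

def check_reverse (string1 : String) (string2 : String) : Bool :=
  checkRevGo string1.toList string2.toList

-- ===== PORT B =====
def check_reverse_alt (string1 : String) (string2 : String) : Bool :=
  let l1 := string1.toList
  let l2 := string2.toList
  if l1.isEmpty then l2.isEmpty
  else if l2.length < l1.length then false
  else (PySem.List.slice l2 (some ((l2.length : Int) - (l1.length : Int))) none).reverse == l1

-- ===== PRECONDITION & SPEC =====
def Spec_check_reverse (string1 : String) (string2 : String) (out : Bool) : Prop := out = check_reverse_alt string1 string2
instance (string1 : String) (string2 : String) (out : Bool) : Decidable (Spec_check_reverse string1 string2 out) := by unfold Spec_check_reverse; infer_instance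

-- ===== CLAIM (what is proved, stated in full; the proofs are below) =====
def Claim_equal_check_reverse : Prop := ∀ (string1 : String) (string2 : String), Dom_check_reverse string1 string2 → Spec_check_reverse string1 string2 (check_reverse string1 string2)

-- ===== LEMMAS AND PROOFS =====

-- common normal form of both programs
def checkRevSpec (l1 l2 : List Char) : Bool :=
  if l1 = [] then decide (l2 = [])
  else if l2.length < l1.length then false
  else decide ((l2.drop (l2.length - l1.length)).reverse = l1)

lemma checkRevGo_eq (l1 : List Char) : ∀ l2 : List Char, checkRevGo l1 l2 = checkRevSpec l1 l2 := by
  induction l1 with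
  | nil =>
    intro l2
    rcases l2.eq_nil_or_concat with h | ⟨ys, z, h⟩
    · subst h
      simp [checkRevGo, checkRevSpec, PySem.List.slice]
    · rw [List.concat_eq_append] at h
      subst h
      rw [checkRevGo, checkRevSpec]
      have hcast : ((ys ++ [z]).length : Int) - 1 = ((ys.length : Nat) : Int) := by simp
      rw [hcast, sliceNN _ _ _ (by omega) (by omega), sliceNN _ _ _ (by omega) (by omega)]
      simp
  | cons c rest ih =>
    intro l2
    rcases l2.eq_nil_or_concat with h | ⟨ys, z, h⟩
    · subst h
      rw [checkRevGo, checkRevSpec]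
      rw [sliceNN _ _ _ (by omega) (by omega)]
      simp [PySem.List.slice]
    · rw [List.concat_eq_append] at h
      subst h
      rw [checkRevGo, checkRevSpec]
      have hcast : ((ys ++ [z]).length : Int) - 1 = ((ys.length : Nat) : Int) := by simp
      have hsl1 : PySem.List.slice (c :: rest) (some 0) (some 1) = [c] := by
        rw [sliceNN _ _ _ (by omega) (by omega)]; rfl
      have hsl2 : PySem.List.slice (ys ++ [z]) (some (((ys ++ [z]).length : Int) - 1)) (some ((ys ++ [z]).length : Int)) = [z] := by
        rw [hcast, sliceNN _ _ _ (by omega) (by omega)]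
        simp
      rw [hsl1, hsl2]
      by_cases hc : c = z
      · subst hc
        rw [if_pos rfl]
        by_cases hr : rest = []
        · subst hr
          simp
        · have hlen : (c :: rest).length > 1 := by
            cases rest with | nil => exact absurd rfl hr | cons a t => simp
          rw [if_pos hlen]
          have hra : PySem.List.slice (c :: rest) (some 1) (some ((c :: rest).length : Int)) = rest := by
            rw [sliceNN _ _ _ (by omega) (by omega)]
            simp
          have hrb : PySem.List.slice (ys ++ [c]) (some 0) (some (((ys ++ [c]).length : Int) - 1)) = ys := by
            rw [hcast, sliceNN _ _ _ (by omega) (by omega)]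
            simp
          rw [hra, hrb, ih ys, checkRevSpec, if_neg hr,
              if_neg (show ¬(c :: rest = []) by simp)]
          by_cases hlt : ys.length < rest.length
          · rw [if_pos hlt,
                if_pos (show (ys ++ [c]).length < (c :: rest).length by
                  simp only [List.length_append, List.length_cons, List.length_nil]; omega)]
          · rw [if_neg hlt,
                if_neg (show ¬((ys ++ [c]).length < (c :: rest).length) by
                  simp only [List.length_append, List.length_cons, List.length_nil]; omega)]
            have hk : ys.length - rest.length ≤ ys.length := by omega
            have hdrop : (ys ++ [c]).drop ((ys ++ [c]).length - (c :: rest).length)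
                = ys.drop (ys.length - rest.length) ++ [c] := by
              have h1 : (ys ++ [c]).length - (c :: rest).length = ys.length - rest.length := by
                simp only [List.length_append, List.length_cons, List.length_nil]; omega
              rw [h1, List.drop_append_of_le_length hk]
            rw [hdrop]
            simp [decide_eq_decide]
      · rw [if_neg (show ¬([c] = [z]) by simp [hc]), if_neg (show ¬(c :: rest = []) by simp)]
        by_cases hlt : (ys ++ [z]).length < (c :: rest).length
        · rw [if_pos hlt]
        · rw [if_neg hlt]
          have hne : ((ys ++ [z]).drop ((ys ++ [z]).length - (c :: rest).length)).reverse ≠ c :: rest := by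
            intro hEq
            have hk : (ys ++ [z]).length - (c :: rest).length ≤ ys.length := by
              simp only [List.length_append, List.length_cons, List.length_nil]; omega
            rw [List.drop_append_of_le_length hk] at hEq
            simp at hEq
            exact hc hEq.1.symm
          exact (decide_eq_false hne).symm

lemma checkRevAlt_eq (s1 s2 : String) : check_reverse_alt s1 s2 = checkRevSpec s1.toList s2.toList := by
  unfold check_reverse_alt checkRevSpec
  by_cases h1 : s1.toList = []
  · rw [if_pos h1, if_pos (by simp [h1])]
    cases s2.toList <;> simp
  · rw [if_neg h1, if_neg (by simp [List.isEmpty_iff, h1])]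
    by_cases hlt : s2.toList.length < s1.toList.length
    · rw [if_pos hlt, if_pos hlt]
    · rw [if_neg hlt, if_neg hlt]
      have ha : (0 : Int) ≤ (s2.toList.length : Int) - (s1.toList.length : Int) := by omega
      rw [PySem.List.slice_from _ ha]
      have hn : ((s2.toList.length : Int) - (s1.toList.length : Int)).toNat = s2.toList.length - s1.toList.length := by
        omega
      rw [hn, beq_eq_decide]

-- ===== VERDICT (by name: the statement is the Claim_ definition above) =====
theorem check_reverse_spec : Claim_equal_check_reverse := by
  intro s1 s2 _
  unfold Spec_check_reverse check_reverse
  rw [checkRevGo_eq, checkRevAlt_eq]
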